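-- pv_equiv track=rewrite | github.com/KennethEnevoldsen/augmenty | augmenty/spans/person.py | handle_entities
-- ===== SOURCE A (Python) =====
-- from typing import Callable, Dict, Iterator, List, Optional
--
-- def handle_entities(
--     values: List[str], aug_ents: List[List[str]], entity_slices: List[tuple]
-- ) -> List[str]:
--     running_add = 0
--     for i, s in enumerate(entity_slices):
--         len_aug_ent = len(aug_ents[i])
--         if len_aug_ent == 1:
--             values[s[0] + running_add : s[1] + running_add] = ["U-PER"]
--         else:
--             values[s[0] + running_add : s[1] + running_add] = (
--                 ["B-PER"] + ["I-PER"] * (len_aug_ent - 2) + ["L-PER"]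
--             )
--         running_add += len_aug_ent - (s[1] - s[0])
--     return values
-- ===== SOURCE B (Python) =====
-- from typing import List
--
--
-- def _resolve(n, i):
--     # Python slice-bound resolution: negative from the end, then clamp to [0, n]
--     if i < 0:
--         i += n
--         return 0 if i < 0 else i
--     return n if i > n else i
--
--
-- def _take(pieces, k):
--     # first k elements of the text represented by pieces, as pieces (no copying)
--     out = []
--     for p in pieces:
--         if k == 0:
--             break
--         n = p[2] - p[1]
--         if n <= k:
--             out.append(p)
--             k -= n
--         else:
--             out.append((p[0], p[1], p[1] + k))
--             break
--     return out
--
--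
-- def _drop(pieces, k):
--     # all but the first k elements, as pieces (no copying)
--     for idx, p in enumerate(pieces):
--         if k == 0:
--             return pieces[idx:]
--         n = p[2] - p[1]
--         if n <= k:
--             k -= n
--         else:
--             return [(p[0], p[1] + k, p[2])] + pieces[idx + 1:]
--     return []
--
--
-- def handle_entities(
--     values: List[str], aug_ents: List[List[str]], entity_slices: List[tuple]
-- ) -> List[str]:
--     pieces = [(values, 0, len(values))]
--     total = len(values)
--     running_add = 0
--     for i, s in enumerate(entity_slices):
--         k = len(aug_ents[i])
--         if k == 1:
--             repl = ["U-PER"]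
--         else:
--             repl = ["B-PER"] + ["I-PER"] * (k - 2) + ["L-PER"]
--         a = _resolve(total, s[0] + running_add)
--         b = max(a, _resolve(total, s[1] + running_add))
--         pieces = _take(pieces, a) + [(repl, 0, len(repl))] + _drop(pieces, b)
--         total += len(repl) - (b - a)
--         running_add += k - (s[1] - s[0])
--     out = []
--     for src, lo, hi in pieces:
--         out.extend(src[lo:hi])
--     return out
-- ===== Notes on version B (the rewrite author's own statement) =====
-- stated objective: alternative
-- what changed: A repeatedly splices the flat list in place (each slice assignment copies list contents, steered by a running offset); B is a piece-table: the state is a list of (source, lo, hi) pieces spliced by index arithmetic only, with an explicitly tracked total length for slice-bound resolution, and the output is materialised once at the end. Pre_ excludes only the inputs where A raises IndexError (a slice tuple with fewer than 2 elements, or entity_slices longer than aug_ents).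
import Mathlib
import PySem

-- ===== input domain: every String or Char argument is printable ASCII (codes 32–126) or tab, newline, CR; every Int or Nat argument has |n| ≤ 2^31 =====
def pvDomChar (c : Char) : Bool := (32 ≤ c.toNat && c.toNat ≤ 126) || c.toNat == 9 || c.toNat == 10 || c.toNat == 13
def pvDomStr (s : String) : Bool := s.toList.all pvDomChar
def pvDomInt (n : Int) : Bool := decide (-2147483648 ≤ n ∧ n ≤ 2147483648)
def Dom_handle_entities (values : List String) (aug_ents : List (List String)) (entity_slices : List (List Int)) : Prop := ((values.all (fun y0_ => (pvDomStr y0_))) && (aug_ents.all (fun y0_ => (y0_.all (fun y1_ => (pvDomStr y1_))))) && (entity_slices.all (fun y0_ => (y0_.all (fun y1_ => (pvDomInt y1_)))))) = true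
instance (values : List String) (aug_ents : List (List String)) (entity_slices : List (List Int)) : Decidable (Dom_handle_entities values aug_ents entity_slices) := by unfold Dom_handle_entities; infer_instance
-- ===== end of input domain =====

-- B replaces A's repeated in-place slice assignments (each copies list contents) with a piece table:
-- (source, lo, hi) pieces spliced by index arithmetic and materialised once at the end — same cost
-- class, different data structure. A mutates `values` in place in Python; the equivalence proved
-- here is about the return value only.

-- ===== PORT A =====
-- s[i] (tuple indexing); Python raises IndexError when out of range — Pre_ keeps it in range, so the default is never used there
def pvGet (s : List Int) (i : Int) : Int := (PySem.List.pyGet? s i).getD 0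

-- loop body of A: `values[s[0]+running_add : s[1]+running_add] = repl` (Python slice assignment:
-- resolve and clamp both bounds, then replace the region between them; insertion point = max of the
-- two resolved bounds) and the running_add update. State = (values, running_add).
def stepA (aug_ents : List (List String)) (st : List String × Int) (p : Int × List Int) : List String × Int :=
  let len_aug_ent : Int := ((PySem.List.pyGet? aug_ents p.1).getD []).length
  let s0 := pvGet p.2 0
  let s1 := pvGet p.2 1
  let repl : List String :=
    if len_aug_ent == 1 then ["U-PER"]
    else "B-PER" :: (List.replicate (len_aug_ent - 2).toNat "I-PER" ++ ["L-PER"])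
  let a := PySem.List.clampIdx st.1.length (s0 + st.2)
  let b := PySem.List.clampIdx st.1.length (s1 + st.2)
  (st.1.take a ++ repl ++ st.1.drop (max a b), st.2 + (len_aug_ent - (s1 - s0)))

def handle_entities (values : List String) (aug_ents : List (List String)) (entity_slices : List (List Int)) : List String :=
  ((PySem.List.enumerate entity_slices 0).foldl (stepA aug_ents) (values, 0)).1

-- ===== PORT B =====
-- a piece (src, lo, hi) stands for src[lo:hi]; plen is its length
def plen (p : List String × Nat × Nat) : Nat := p.2.2 - p.2.1

-- _resolve of Source B: Python slice-bound resolution (negative from the end, clamp to [0, n])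
def resolveIdx (n i : Int) : Int :=
  if i < 0 then (if i + n < 0 then 0 else i + n) else (if i > n then n else i)

-- _take of Source B: first k elements of the represented text, as pieces
def pieceTake : Nat → List (List String × Nat × Nat) → List (List String × Nat × Nat)
  | _, [] => []
  | k, p :: ps =>
    if k = 0 then []
    else if plen p ≤ k then p :: pieceTake (k - plen p) ps
    else [(p.1, p.2.1, p.2.1 + k)]

-- _drop of Source B: all but the first k elements, as pieces
def pieceDrop : Nat → List (List String × Nat × Nat) → List (List String × Nat × Nat)
  | _, [] => []
  | k, p :: ps =>
    if k = 0 then p :: ps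
    else if plen p ≤ k then pieceDrop (k - plen p) ps
    else (p.1, p.2.1 + k, p.2.2) :: ps

-- loop body of B: resolve the bounds against the tracked total length, splice the piece list,
-- update total and running_add. State = (pieces, total, running_add).
def stepB (aug_ents : List (List String)) (st : List (List String × Nat × Nat) × Int × Int)
    (p : Int × List Int) : List (List String × Nat × Nat) × Int × Int :=
  let k : Int := ((PySem.List.pyGet? aug_ents p.1).getD []).length
  let s0 := pvGet p.2 0
  let s1 := pvGet p.2 1
  let repl : List String :=
    if k == 1 then ["U-PER"]
    else "B-PER" :: (List.replicate (k - 2).toNat "I-PER" ++ ["L-PER"])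
  let total := st.2.1
  let ra := st.2.2
  let a := resolveIdx total (s0 + ra)
  let b := max a (resolveIdx total (s1 + ra))
  (pieceTake a.toNat st.1 ++ (repl, 0, repl.length) :: pieceDrop b.toNat st.1,
   total + ((repl.length : Int) - (b - a)),
   ra + (k - (s1 - s0)))

def handle_entities_alt (values : List String) (aug_ents : List (List String)) (entity_slices : List (List Int)) : List String :=
  let r := (PySem.List.enumerate entity_slices 0).foldl (stepB aug_ents)
    ([(values, 0, values.length)], (values.length : Int), 0)
  r.1.foldl (fun acc p => acc ++ PySem.List.slice p.1 (some (p.2.1 : Int)) (some (p.2.2 : Int))) []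

-- ===== PRECONDITION & SPEC =====
-- Pre_ excludes exactly the inputs where A raises IndexError: a slice tuple with fewer than 2
-- elements (s[0]/s[1]), or entity_slices longer than aug_ents (aug_ents[i]).
def Pre_handle_entities (values : List String) (aug_ents : List (List String)) (entity_slices : List (List Int)) : Prop :=
  entity_slices.length ≤ aug_ents.length ∧ ∀ s ∈ entity_slices, 2 ≤ s.length

instance (values : List String) (aug_ents : List (List String)) (entity_slices : List (List Int)) : Decidable (Pre_handle_entities values aug_ents entity_slices) := by unfold Pre_handle_entities; infer_instance

def pvWitness_handle_entities : List String × List (List String) × List (List Int) :=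
  (["a", "b", "c", "d", "e"], [["x"], ["p", "q", "r"]], [[1, 2], [3, 5]])

def Spec_handle_entities (values : List String) (aug_ents : List (List String)) (entity_slices : List (List Int)) (out : List String) : Prop := out = handle_entities_alt values aug_ents entity_slices
instance (values : List String) (aug_ents : List (List String)) (entity_slices : List (List Int)) (out : List String) : Decidable (Spec_handle_entities values aug_ents entity_slices out) := by unfold Spec_handle_entities; infer_instance

-- ===== CLAIM (what is proved, stated in full; the proofs are below) =====
def Claim_equal_handle_entities : Prop := ∀ (values : List String) (aug_ents : List (List String)) (entity_slices : List (List Int)), Dom_handle_entities values aug_ents entity_slices → Pre_handle_entities values aug_ents entity_slices → Spec_handle_entities values aug_ents entity_slices (handle_entities values aug_ents entity_slices)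

-- ===== LEMMAS AND PROOFS =====

-- the text a piece stands for, and for a whole piece list
def pflat (p : List String × Nat × Nat) : List String := (p.1.drop p.2.1).take (p.2.2 - p.2.1)
def mflat (ps : List (List String × Nat × Nat)) : List String := (ps.map pflat).flatten

-- well-formed piece: lo ≤ hi ≤ length of the source
def pwf (p : List String × Nat × Nat) : Prop := p.2.1 ≤ p.2.2 ∧ p.2.2 ≤ p.1.length

-- A's / B's step once the aug_ents lookup has been resolved to the zipped entity e
def stepAZ (st : List String × Int) (p : List String × List Int) : List String × Int :=
  let len_aug_ent : Int := p.1.length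
  let s0 := pvGet p.2 0
  let s1 := pvGet p.2 1
  let repl : List String :=
    if len_aug_ent == 1 then ["U-PER"]
    else "B-PER" :: (List.replicate (len_aug_ent - 2).toNat "I-PER" ++ ["L-PER"])
  let a := PySem.List.clampIdx st.1.length (s0 + st.2)
  let b := PySem.List.clampIdx st.1.length (s1 + st.2)
  (st.1.take a ++ repl ++ st.1.drop (max a b), st.2 + (len_aug_ent - (s1 - s0)))

def stepBZ (st : List (List String × Nat × Nat) × Int × Int)
    (p : List String × List Int) : List (List String × Nat × Nat) × Int × Int :=
  let k : Int := p.1.length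
  let s0 := pvGet p.2 0
  let s1 := pvGet p.2 1
  let repl : List String :=
    if k == 1 then ["U-PER"]
    else "B-PER" :: (List.replicate (k - 2).toNat "I-PER" ++ ["L-PER"])
  let total := st.2.1
  let ra := st.2.2
  let a := resolveIdx total (s0 + ra)
  let b := max a (resolveIdx total (s1 + ra))
  (pieceTake a.toNat st.1 ++ (repl, 0, repl.length) :: pieceDrop b.toNat st.1,
   total + ((repl.length : Int) - (b - a)),
   ra + (k - (s1 - s0)))

-- the fold over `enumerate`, indexing into aug_ents = pre ++ tail at absolute positions, is the fold
-- of the resolved step over the zip with the tail (generic in the step function)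
theorem fold_enum_zip {σ : Type} (step : List (List String) → σ → Int × List Int → σ)
    (stepZ : σ → List String × List Int → σ)
    (hstep : ∀ (ents : List (List String)) (st : σ) (i : Int) (s : List Int) (e : List String),
      PySem.List.pyGet? ents i = some e → step ents st (i, s) = stepZ st (e, s)) :
    ∀ (slices : List (List Int)) (pre tail : List (List String)) (st : σ),
    slices.length ≤ tail.length →
    (PySem.List.enumerate slices (pre.length : Int)).foldl (step (pre ++ tail)) st
      = (tail.zip slices).foldl stepZ st := by
  intro slices
  induction slices with
  | nil => intro pre tail st h; simp [PySem.List.enumerate]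
  | cons s ss ih =>
    intro pre tail st h
    cases tail with
    | nil => simp at h
    | cons e ts =>
      rw [PySem.List.enumerate_cons]
      simp only [List.zip_cons_cons, List.foldl_cons]
      rw [hstep (pre ++ e :: ts) st (pre.length : Int) s e (PySem.List.pyGet?_append_length pre ts e)]
      have := ih (pre ++ [e]) ts (stepZ st (e, s)) (by simpa using Nat.le_of_succ_le_succ (by simpa using h))
      simpa using this

theorem pflat_length (p : List String × Nat × Nat) (h : pwf p) : (pflat p).length = plen p := by
  obtain ⟨h1, h2⟩ := h
  simp [pflat, plen]
  omega

theorem mflat_cons (p : List String × Nat × Nat) (ps : List (List String × Nat × Nat)) :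
    mflat (p :: ps) = pflat p ++ mflat ps := by
  simp [mflat]

theorem mflat_take : ∀ (ps : List (List String × Nat × Nat)) (k : Nat), (∀ p ∈ ps, pwf p) →
    mflat (pieceTake k ps) = (mflat ps).take k := by
  intro ps
  induction ps with
  | nil => intro k h; simp [pieceTake, mflat]
  | cons p ps ih =>
    intro k h
    have hp : pwf p := h p (by simp)
    have hl : (pflat p).length = plen p := pflat_length p hp
    rw [mflat_cons, List.take_append, hl]
    unfold pieceTake
    split_ifs with h0 h1
    · simp [h0, mflat]
    · rw [mflat_cons, ih (k - plen p) (fun q hq => h q (by simp [hq])),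
        List.take_of_length_le (l := pflat p) (by omega)]
    · have : k - plen p = 0 := by omega
      rw [this]
      simp only [List.take_zero, List.append_nil]
      simp only [mflat, List.map_cons, List.map_nil, List.flatten_cons, List.flatten_nil,
        List.append_nil, pflat]
      rw [List.take_take]
      simp only [plen] at h1
      congr 1
      omega

theorem mflat_drop : ∀ (ps : List (List String × Nat × Nat)) (k : Nat), (∀ p ∈ ps, pwf p) →
    mflat (pieceDrop k ps) = (mflat ps).drop k := by
  intro ps
  induction ps with
  | nil => intro k h; simp [pieceDrop, mflat]
  | cons p ps ih =>
    intro k h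
    have hp : pwf p := h p (by simp)
    have hl : (pflat p).length = plen p := pflat_length p hp
    rw [mflat_cons, List.drop_append, hl]
    unfold pieceDrop
    split_ifs with h0 h1
    · simp [h0, mflat_cons]
    · rw [ih (k - plen p) (fun q hq => h q (by simp [hq])),
        List.drop_eq_nil_of_le (as := pflat p) (by omega), List.nil_append]
    · have : k - plen p = 0 := by omega
      rw [this]
      simp only [List.drop_zero]
      rw [mflat_cons]
      congr 1
      simp only [pflat, List.drop_take, List.drop_drop]
      congr 1
      omega

theorem wf_pieceTake : ∀ (ps : List (List String × Nat × Nat)) (k : Nat), (∀ p ∈ ps, pwf p) →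
    ∀ q ∈ pieceTake k ps, pwf q := by
  intro ps
  induction ps with
  | nil => intro k h q hq; simp [pieceTake] at hq
  | cons p ps ih =>
    intro k h q hq
    have hp : pwf p := h p (by simp)
    unfold pieceTake at hq
    split_ifs at hq with h0 h1
    · simp at hq
    · rcases List.mem_cons.mp hq with hq | hq
      · exact hq ▸ hp
      · exact ih (k - plen p) (fun r hr => h r (by simp [hr])) q hq
    · simp at hq
      obtain ⟨h1e, h2e⟩ := hp
      subst hq
      simp only [plen] at h1
      exact ⟨by change p.2.1 ≤ p.2.1 + k; omega, by change p.2.1 + k ≤ p.1.length; omega⟩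

theorem wf_pieceDrop : ∀ (ps : List (List String × Nat × Nat)) (k : Nat), (∀ p ∈ ps, pwf p) →
    ∀ q ∈ pieceDrop k ps, pwf q := by
  intro ps
  induction ps with
  | nil => intro k h q hq; simp [pieceDrop] at hq
  | cons p ps ih =>
    intro k h q hq
    have hp : pwf p := h p (by simp)
    unfold pieceDrop at hq
    split_ifs at hq with h0 h1
    · exact h q hq
    · exact ih (k - plen p) (fun r hr => h r (by simp [hr])) q hq
    · rcases List.mem_cons.mp hq with hq | hq
      · obtain ⟨h1e, h2e⟩ := hp
        subst hq
        simp only [plen] at h1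
        exact ⟨by change p.2.1 + k ≤ p.2.2; omega, by change p.2.2 ≤ p.1.length; omega⟩
      · exact h q (by simp [hq])

theorem resolve_clamp (n : Nat) (i : Int) :
    resolveIdx (n : Int) i = ((PySem.List.clampIdx n i : Nat) : Int) := by
  unfold resolveIdx PySem.List.clampIdx
  split_ifs <;> omega

theorem foldl_slice (ps : List (List String × Nat × Nat)) : ∀ (acc : List String),
    ps.foldl (fun acc p => acc ++ PySem.List.slice p.1 (some (p.2.1 : Int)) (some (p.2.2 : Int))) acc
      = acc ++ mflat ps := by
  induction ps with
  | nil => intro acc; simp [mflat]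
  | cons p ps ih =>
    intro acc
    rw [List.foldl_cons, ih, mflat_cons, PySem.List.slice_natCast]
    simp [pflat]

-- one step: B's piece splice materialises to A's list splice, and total stays the flat length
theorem step_eq (ps : List (List String × Nat × Nat)) (total ra : Int)
    (e : List String) (s : List Int)
    (hwf : ∀ p ∈ ps, pwf p) (htot : total = ((mflat ps).length : Int)) :
    mflat (stepBZ (ps, total, ra) (e, s)).1 = (stepAZ (mflat ps, ra) (e, s)).1
    ∧ (stepBZ (ps, total, ra) (e, s)).2.1 = ((mflat (stepBZ (ps, total, ra) (e, s)).1).length : Int)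
    ∧ (stepBZ (ps, total, ra) (e, s)).2.2 = (stepAZ (mflat ps, ra) (e, s)).2
    ∧ ∀ q ∈ (stepBZ (ps, total, ra) (e, s)).1, pwf q := by
  subst htot
  unfold stepBZ stepAZ
  set s0 := pvGet s 0 with hs0
  set s1 := pvGet s 1 with hs1
  set n := (mflat ps).length with hn
  set aN := PySem.List.clampIdx n (s0 + ra) with haN
  set bN := PySem.List.clampIdx n (s1 + ra) with hbN
  have hA : resolveIdx (n : Int) (s0 + ra) = (aN : Int) := resolve_clamp _ _
  have hB : resolveIdx (n : Int) (s1 + ra) = (bN : Int) := resolve_clamp _ _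
  have haLe : aN ≤ n := PySem.List.clampIdx_le _ _
  have hbLe : bN ≤ n := PySem.List.clampIdx_le _ _
  have h1 : (resolveIdx (n : Int) (s0 + ra)).toNat = aN := by rw [hA]; simp
  have h2 : (max (resolveIdx (n : Int) (s0 + ra)) (resolveIdx (n : Int) (s1 + ra))).toNat
      = max aN bN := by rw [hA, hB]; omega
  set repl : List String :=
    (if ((e.length : Int) == 1) = true then ["U-PER"]
     else "B-PER" :: (List.replicate ((e.length : Int) - 2).toNat "I-PER" ++ ["L-PER"])) with hrepl
  have hflat : mflat (pieceTake (resolveIdx (n : Int) (s0 + ra)).toNat ps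
        ++ (repl, 0, repl.length) :: pieceDrop (max (resolveIdx (n : Int) (s0 + ra)) (resolveIdx (n : Int) (s1 + ra))).toNat ps)
      = (mflat ps).take aN ++ repl ++ (mflat ps).drop (max aN bN) := by
    rw [h1, h2]
    simp only [mflat, List.map_append, List.map_cons, List.flatten_append, List.flatten_cons]
    rw [← mflat, ← mflat, mflat_take ps aN hwf, mflat_drop ps (max aN bN) hwf]
    simp [pflat, mflat]
  refine ⟨?_, ?_, ?_, ?_⟩
  · exact hflat
  · show (n : Int) + ((repl.length : Int) - (max (resolveIdx (n : Int) (s0 + ra)) (resolveIdx (n : Int) (s1 + ra)) - resolveIdx (n : Int) (s0 + ra))) = _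
    rw [hflat, hA, hB]
    simp only [List.length_append, List.length_take, List.length_drop]
    omega
  · rfl
  · intro q hq
    rcases List.mem_append.mp hq with hq | hq
    · exact wf_pieceTake ps _ hwf q (h1 ▸ hq)
    · rcases List.mem_cons.mp hq with hq | hq
      · subst hq; exact ⟨Nat.zero_le _, le_refl _⟩
      · exact wf_pieceDrop ps _ hwf q (h2 ▸ hq)

-- the fold invariant: A's state is (materialisation of B's pieces, B's running_add), and B's total
-- is the materialised length, with all pieces well-formed
theorem main_inv : ∀ (pairs : List (List String × List Int)) (ps : List (List String × Nat × Nat))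
    (total ra : Int), (∀ p ∈ ps, pwf p) → total = ((mflat ps).length : Int) →
    pairs.foldl stepAZ (mflat ps, ra)
      = (mflat (pairs.foldl stepBZ (ps, total, ra)).1, (pairs.foldl stepBZ (ps, total, ra)).2.2)
    ∧ (∀ q ∈ (pairs.foldl stepBZ (ps, total, ra)).1, pwf q)
    ∧ (pairs.foldl stepBZ (ps, total, ra)).2.1
        = ((mflat (pairs.foldl stepBZ (ps, total, ra)).1).length : Int) := by
  intro pairs
  induction pairs with
  | nil => intro ps total ra hwf htot; subst htot; exact ⟨rfl, hwf, rfl⟩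
  | cons pr rest ih =>
    intro ps total ra hwf htot
    obtain ⟨e, s⟩ := pr
    simp only [List.foldl_cons]
    obtain ⟨hf, htot2, hra2, hwf2⟩ := step_eq ps total ra e s hwf htot
    have hstA : stepAZ (mflat ps, ra) (e, s)
        = (mflat (stepBZ (ps, total, ra) (e, s)).1, (stepBZ (ps, total, ra) (e, s)).2.2) :=
      Prod.ext_iff.mpr ⟨hf.symm, hra2.symm⟩
    rw [hstA]
    have := ih (stepBZ (ps, total, ra) (e, s)).1 (stepBZ (ps, total, ra) (e, s)).2.1
      (stepBZ (ps, total, ra) (e, s)).2.2 hwf2 htot2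
    simpa using this

-- ===== VERDICT (by name: the statement is the Claim_ definition above) =====
theorem handle_entities_spec : Claim_equal_handle_entities := by
  intro values aug_ents entity_slices _ hpre
  obtain ⟨hlen, _⟩ := hpre
  show _ = _
  unfold handle_entities handle_entities_alt
  have hA : (PySem.List.enumerate entity_slices 0).foldl (stepA aug_ents) (values, 0)
      = (aug_ents.zip entity_slices).foldl stepAZ (values, 0) := by
    have := fold_enum_zip stepA stepAZ
      (fun ents st i s e h => by unfold stepA stepAZ; rw [h]; simp)
      entity_slices [] aug_ents (values, 0) hlen
    simpa using this
  have hB : (PySem.List.enumerate entity_slices 0).foldl (stepB aug_ents)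
        ([(values, 0, values.length)], (values.length : Int), 0)
      = (aug_ents.zip entity_slices).foldl stepBZ
        ([(values, 0, values.length)], (values.length : Int), 0) := by
    have := fold_enum_zip stepB stepBZ
      (fun ents st i s e h => by unfold stepB stepBZ; rw [h]; simp)
      entity_slices [] aug_ents ([(values, 0, values.length)], (values.length : Int), 0) hlen
    simpa using this
  rw [hA, hB, foldl_slice]
  have hwf0 : ∀ p ∈ [(values, 0, values.length)], pwf p := by
    intro p hp
    simp only [List.mem_singleton] at hp
    subst hp
    exact ⟨Nat.zero_le _, le_refl _⟩
  have hm0 : mflat [(values, 0, values.length)] = values := by simp [mflat, pflat]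
  obtain ⟨hfold, -, -⟩ := main_inv (aug_ents.zip entity_slices) [(values, 0, values.length)]
    (values.length : Int) 0 hwf0 (by rw [hm0])
  rw [hm0] at hfold
  rw [hfold]
  simp
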